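-- pv_equiv track=rewrite | github.com/michaelkimm/Algorithm-problem-solving-thought-process-re-record | Python/Programmers/MockTest.py | solution
-- ===== SOURCE A (Python) =====
-- def solution(answers):
--     p1 = [1,2,3,4,5]
--     p2 = [2,1,2,3,2,4,2,5]
--     p3 = [3,3,1,1,2,2,4,4,5,5]
--
--     score = [0, 0, 0]
--     for idx in range(len(answers)):
--         if answers[idx] == p1[idx % len(p1)]:
--             score[0] += 1
--         if answers[idx] == p2[idx % len(p2)]:
--             score[1] += 1
--         if answers[idx] == p3[idx % len(p3)]:
--             score[2] += 1
--
--     result = []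
--
--     max_val = max(score)
--     for idx, val in enumerate(score):
--         if max_val == val:
--             result.append(idx + 1)
--
--     result.sort()
--
--     return result
-- ===== SOURCE B (Python) =====
-- def _cycle_score(answers, p):
--     # one pass over answers, cycling through pattern p
--     score = 0
--     cur = p
--     for a in answers:
--         if a == cur[0]:
--             score += 1
--         cur = cur[1:] if len(cur) > 1 else p
--     return score
--
--
-- def solution(answers):
--     patterns = [[1, 2, 3, 4, 5],
--                 [2, 1, 2, 3, 2, 4, 2, 5],
--                 [3, 3, 1, 1, 2, 2, 4, 4, 5, 5]]
--     scores = [_cycle_score(answers, p) for p in patterns]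
--     m = max(scores)
--     return [i + 1 for i, s in enumerate(scores) if s == m]
-- ===== Notes on version B (the rewrite author's own statement) =====
-- stated objective: alternative
-- what changed: B replaces A's single indexed loop with three parallel if-branches and modular indexing by a per-pattern helper that walks answers once per pattern while cycling through a rotating suffix of the pattern (no index arithmetic), then selects the argmax indices with a comprehension instead of an append loop followed by a redundant sort.
import Mathlib
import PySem

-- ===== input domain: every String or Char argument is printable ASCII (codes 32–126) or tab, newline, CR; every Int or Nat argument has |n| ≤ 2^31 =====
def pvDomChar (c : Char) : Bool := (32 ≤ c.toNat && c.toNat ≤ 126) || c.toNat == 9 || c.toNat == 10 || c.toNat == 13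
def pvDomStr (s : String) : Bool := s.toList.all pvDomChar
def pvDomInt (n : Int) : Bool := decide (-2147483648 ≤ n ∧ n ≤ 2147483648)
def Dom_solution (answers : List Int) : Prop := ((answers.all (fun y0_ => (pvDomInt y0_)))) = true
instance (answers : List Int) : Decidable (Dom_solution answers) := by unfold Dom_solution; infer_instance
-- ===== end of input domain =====

-- B replaces A's single indexed loop (three parallel ifs + modular indexing) by a per-pattern
-- pass that cycles through a rotating suffix of the pattern, and a comprehension over the scores
-- instead of an append loop plus a redundant sort; same O(n) cost (objective: alternative).


-- ===== PORT A =====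
def solution (answers : List Int) : List Int :=
  let p1 : List Int := [1,2,3,4,5]
  let p2 : List Int := [2,1,2,3,2,4,2,5]
  let p3 : List Int := [3,3,1,1,2,2,4,4,5,5]
  let score :=
    (PySem.List.pyRange 0 (answers.length : Int) 1).foldl
      (fun (s : Int × Int × Int) idx =>
        (if PySem.List.pyGetD answers idx 0 = PySem.List.pyGetD p1 (PySem.Int.mod idx (p1.length : Int)) 0 then s.1 + 1 else s.1,
         if PySem.List.pyGetD answers idx 0 = PySem.List.pyGetD p2 (PySem.Int.mod idx (p2.length : Int)) 0 then s.2.1 + 1 else s.2.1,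
         if PySem.List.pyGetD answers idx 0 = PySem.List.pyGetD p3 (PySem.Int.mod idx (p3.length : Int)) 0 then s.2.2 + 1 else s.2.2))
      (0, 0, 0)
  let scoreL : List Int := [score.1, score.2.1, score.2.2]
  let maxVal : Int := (PySem.List.max? scoreL (fun x => x)).getD 0   -- max(score); scoreL nonempty, so exact
  let result :=
    (PySem.List.enumerate scoreL 0).foldl
      (fun (r : List Int) iv => if maxVal = iv.2 then r ++ [iv.1 + 1] else r) []
  PySem.List.sorted result (fun x => x) false

-- ===== PORT B =====
-- the `[] => st` branch is unreachable: `cur` is always a nonempty suffix of the nonempty pattern p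
def cycleScore (answers p : List Int) : Int :=
  (answers.foldl
    (fun (st : Int × List Int) a =>
      match st.2 with
      | [] => st
      | c :: cs => (if a = c then st.1 + 1 else st.1, if cs = [] then p else cs))
    (0, p)).1

def solution_alt (answers : List Int) : List Int :=
  let patterns : List (List Int) := [[1,2,3,4,5],[2,1,2,3,2,4,2,5],[3,3,1,1,2,2,4,4,5,5]]
  let scores : List Int := patterns.map (fun p => cycleScore answers p)
  let m : Int := (PySem.List.max? scores (fun x => x)).getD 0
  ((PySem.List.enumerate scores 0).filter (fun iv => iv.2 = m)).map (fun iv => iv.1 + 1)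

-- ===== PRECONDITION & SPEC =====
def Spec_solution (answers : List Int) (out : List Int) : Prop := out = solution_alt answers
instance (answers : List Int) (out : List Int) : Decidable (Spec_solution answers out) := by unfold Spec_solution; infer_instance

-- ===== CLAIM (what is proved, stated in full; the proofs are below) =====
def Claim_equal_solution : Prop := ∀ (answers : List Int), Dom_solution answers → Spec_solution answers (solution answers)

-- ===== LEMMAS AND PROOFS =====

-- a fold whose three components are independent splits into three folds
lemma foldl_triple (l : List Int) (f g h : Int → Int → Int) :
    ∀ s : Int × Int × Int,
      l.foldl (fun st x => (f st.1 x, g st.2.1 x, h st.2.2 x)) s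
        = (l.foldl f s.1, l.foldl g s.2.1, l.foldl h s.2.2) := by
  induction l with
  | nil => intro s; rfl
  | cons x t ih => intro s; simpa using ih (f s.1 x, g s.2.1 x, h s.2.2 x)

-- A's per-pattern indexed count equals B's cycling fold
lemma single_score (answers p : List Int) (hp : p ≠ []) :
    ∀ (n i : Nat) (s : Int),
      n = answers.length - i → i ≤ answers.length →
      (PySem.List.pyRange (i : Int) (answers.length : Int) 1).foldl
        (fun acc idx => if PySem.List.pyGetD answers idx 0 = PySem.List.pyGetD p (PySem.Int.mod idx (p.length : Int)) 0 then acc + 1 else acc) s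
      = ((answers.drop i).foldl
          (fun (st : Int × List Int) a =>
            match st.2 with
            | [] => st
            | c :: cs => (if a = c then st.1 + 1 else st.1, if cs = [] then p else cs))
          (s, p.drop (i % p.length))).1 := by
  intro n
  induction n with
  | zero =>
    intro i s hn hi
    have hi' : i = answers.length := by omega
    subst hi'
    rw [PySem.List.pyRange_one_eq_nil (le_refl _)]
    simp
  | succ k ih =>
    intro i s hn hi
    have hlt : i < answers.length := by omega
    have hm : 0 < p.length := List.length_pos_of_ne_nil hp
    have hkm : i % p.length < p.length := Nat.mod_lt _ hm
    have hcons : PySem.List.pyRange (i : Int) (answers.length : Int) 1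
        = (i : Int) :: PySem.List.pyRange ((i : Int) + 1) (answers.length : Int) 1 :=
      PySem.List.pyRange_one_cons (by exact_mod_cast hlt)
    have hdropA : answers.drop i = answers[i] :: answers.drop (i + 1) :=
      List.drop_eq_getElem_cons hlt
    have hdropP : p.drop (i % p.length) = p[i % p.length] :: p.drop (i % p.length + 1) :=
      List.drop_eq_getElem_cons hkm
    have hget1 : PySem.List.pyGetD answers (i : Int) 0 = answers[i] := by
      rw [PySem.List.pyGetD_natCast]; exact List.getD_eq_getElem _ _ hlt
    have hget2 : PySem.List.pyGetD p (PySem.Int.mod (i : Int) (p.length : Int)) 0 = p[i % p.length] := by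
      rw [PySem.Int.mod_natCast, PySem.List.pyGetD_natCast]
      exact List.getD_eq_getElem _ _ hkm
    have hnext : (if p.drop (i % p.length + 1) = [] then p else p.drop (i % p.length + 1))
        = p.drop ((i + 1) % p.length) := by
      by_cases hc : p.drop (i % p.length + 1) = []
      · have hlen : p.length ≤ i % p.length + 1 := by
          have := List.drop_eq_nil_iff.mp hc; omega
        have heq : i % p.length + 1 = p.length := by omega
        have hdm := Nat.div_add_mod i p.length
        have h1 : i + 1 = p.length * (i / p.length + 1) := by
          rw [Nat.mul_succ]; omega
        have h2 : (i + 1) % p.length = 0 := by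
          rw [h1]; exact Nat.mul_mod_right _ _
        simp [hc, h2]
      · have hlen : i % p.length + 1 < p.length := by
          have h' : ¬ p.length ≤ i % p.length + 1 :=
            fun hle => hc (List.drop_eq_nil_iff.mpr hle)
          omega
        have h2 : (i + 1) % p.length = i % p.length + 1 := by
          rw [Nat.add_mod, Nat.mod_eq_of_lt (show 1 < p.length by omega),
              Nat.mod_eq_of_lt (by omega : i % p.length + 1 < p.length)]
        simp [hc, h2]
    rw [hcons, hdropA, hdropP]
    simp only [List.foldl_cons]
    rw [hget1, hget2]
    have hcast : ((i : Int) + 1) = ((i + 1 : Nat) : Int) := by push_cast; ring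
    rw [hcast]
    have := ih (i + 1) (if answers[i] = p[i % p.length] then s + 1 else s) (by omega) (by omega)
    rw [this, hnext]

lemma final_stage (s1 s2 s3 m : Int) :
    PySem.List.sorted
      ((PySem.List.enumerate [s1, s2, s3] 0).foldl
        (fun (r : List Int) iv => if m = iv.2 then r ++ [iv.1 + 1] else r) [])
      (fun x => x) false
    = ((PySem.List.enumerate [s1, s2, s3] 0).filter (fun iv => iv.2 = m)).map (fun iv => iv.1 + 1) := by
  have he : PySem.List.enumerate [s1, s2, s3] (0 : Int) = [(0, s1), (1, s2), (2, s3)] := by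
    simp [PySem.List.enumerate_cons, PySem.List.enumerate_nil]
  rw [he, PySem.List.foldl_append_ite (fun iv : Int × Int => m = iv.2) (fun iv => iv.1 + 1)]
  have hfe : List.filter (fun iv : Int × Int => decide (m = iv.2)) [(0, s1), (1, s2), (2, s3)]
      = List.filter (fun iv : Int × Int => decide (iv.2 = m)) [(0, s1), (1, s2), (2, s3)] :=
    List.filter_congr (by intro x _; simp [eq_comm])
  rw [List.nil_append, hfe]
  apply PySem.List.sorted_eq_self_of_pairwise
  rw [List.pairwise_map]
  have hp : List.Pairwise (fun a b : Int × Int => a.1 + 1 ≤ b.1 + 1) [(0, s1), (1, s2), (2, s3)] := by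
    norm_num [List.pairwise_cons]
  exact hp.sublist List.filter_sublist

lemma scores_eq (answers : List Int) (p : List Int) (hp : p ≠ []) :
    (PySem.List.pyRange 0 (answers.length : Int) 1).foldl
      (fun acc idx => if PySem.List.pyGetD answers idx 0 = PySem.List.pyGetD p (PySem.Int.mod idx (p.length : Int)) 0 then acc + 1 else acc) 0
    = cycleScore answers p := by
  have h := single_score answers p hp answers.length 0 0 (by omega) (by omega)
  simpa [cycleScore] using h

lemma triple_scores (answers : List Int) :
    (PySem.List.pyRange 0 (answers.length : Int) 1).foldl
      (fun (s : Int × Int × Int) idx =>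
        (if PySem.List.pyGetD answers idx 0 = PySem.List.pyGetD [1,2,3,4,5] (PySem.Int.mod idx ((([1,2,3,4,5] : List Int)).length : Int)) 0 then s.1 + 1 else s.1,
         if PySem.List.pyGetD answers idx 0 = PySem.List.pyGetD [2,1,2,3,2,4,2,5] (PySem.Int.mod idx ((([2,1,2,3,2,4,2,5] : List Int)).length : Int)) 0 then s.2.1 + 1 else s.2.1,
         if PySem.List.pyGetD answers idx 0 = PySem.List.pyGetD [3,3,1,1,2,2,4,4,5,5] (PySem.Int.mod idx ((([3,3,1,1,2,2,4,4,5,5] : List Int)).length : Int)) 0 then s.2.2 + 1 else s.2.2))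
      (0, 0, 0)
    = (cycleScore answers [1,2,3,4,5], cycleScore answers [2,1,2,3,2,4,2,5], cycleScore answers [3,3,1,1,2,2,4,4,5,5]) := by
  rw [foldl_triple _
    (fun acc idx => if PySem.List.pyGetD answers idx 0 = PySem.List.pyGetD [1,2,3,4,5] (PySem.Int.mod idx ((([1,2,3,4,5] : List Int)).length : Int)) 0 then acc + 1 else acc)
    (fun acc idx => if PySem.List.pyGetD answers idx 0 = PySem.List.pyGetD [2,1,2,3,2,4,2,5] (PySem.Int.mod idx ((([2,1,2,3,2,4,2,5] : List Int)).length : Int)) 0 then acc + 1 else acc)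
    (fun acc idx => if PySem.List.pyGetD answers idx 0 = PySem.List.pyGetD [3,3,1,1,2,2,4,4,5,5] (PySem.Int.mod idx ((([3,3,1,1,2,2,4,4,5,5] : List Int)).length : Int)) 0 then acc + 1 else acc)]
  refine Prod.ext ?_ (Prod.ext ?_ ?_)
  · exact scores_eq answers [1,2,3,4,5] (by decide)
  · exact scores_eq answers [2,1,2,3,2,4,2,5] (by decide)
  · exact scores_eq answers [3,3,1,1,2,2,4,4,5,5] (by decide)

-- ===== VERDICT (by name: the statement is the Claim_ definition above) =====
theorem solution_spec : Claim_equal_solution := by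
  intro answers _
  unfold Spec_solution solution solution_alt
  simp only [List.map_cons, List.map_nil]
  rw [triple_scores answers]
  exact final_stage _ _ _ _
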